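-- pv_equiv track=rewrite | github.com/m0hamadazzam/strudel-ai-experiment | backend/import_data.py | _description_from_tune_code
-- ===== SOURCE A (Python) =====
-- def _description_from_tune_code(code):
--     """Build a short description from the first comment line(s) of tune code."""
--     lines = code.strip().split("\n")
--     comment_lines = []
--     for line in lines:
--         s = line.strip()
--         if s.startswith("//"):
--             comment_lines.append(s[2:].strip())
--         elif s and not comment_lines:
--             break
--         elif not s and comment_lines:
--             continue
--         else:
--             break
--     if not comment_lines:
--         return ""
--     first = comment_lines[0]
--     if first.startswith('"') and '"' in first[1:]:
--         first = first[1 : first.index('"', 1)]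
--     first = first.split("@by")[0].strip()
--     return first[:500] if first else ""
-- ===== SOURCE B (Python) =====
-- def _description_from_tune_code(code):
--     """Build a short description from the first comment line(s) of tune code."""
--     first_line = code.strip().split("\n")[0].strip()
--     if not first_line.startswith("//"):
--         return ""
--     first = first_line[2:].strip()
--     if first.startswith('"') and '"' in first[1:]:
--         first = first[1 : first.index('"', 1)]
--     first = first.split("@by")[0].strip()
--     return first[:500] if first else ""
-- ===== Notes on version B (the rewrite author's own statement) =====
-- stated objective: simpler
-- what changed: Replaces A's line-by-line state machine (loop collecting comment lines with break/continue) by a direct extraction of the first line, since only the first collected comment line is ever used and code.strip() guarantees the first line decides everything.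
import Mathlib
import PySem

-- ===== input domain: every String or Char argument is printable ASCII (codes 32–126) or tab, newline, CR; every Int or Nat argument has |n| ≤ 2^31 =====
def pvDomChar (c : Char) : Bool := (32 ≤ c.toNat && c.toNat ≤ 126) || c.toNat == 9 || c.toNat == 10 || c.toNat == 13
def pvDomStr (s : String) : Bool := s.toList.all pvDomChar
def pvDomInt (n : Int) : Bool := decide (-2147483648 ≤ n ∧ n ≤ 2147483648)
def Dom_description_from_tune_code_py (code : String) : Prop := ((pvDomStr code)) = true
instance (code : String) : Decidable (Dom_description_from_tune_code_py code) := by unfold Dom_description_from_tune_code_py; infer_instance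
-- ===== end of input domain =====

-- B replaces A's line-by-line comment-collecting state machine by direct extraction of the
-- first line (only the first collected comment line is ever used); objective: simpler.

-- ===== PORT A =====

-- shared tail: both Pythons post-process the first comment line with the IDENTICAL code
-- (quote extraction via index('"',1), split("@by")[0].strip(), first[:500] if first else "")
def pvPost (first0 : List Char) : String :=
  let first1 :=
    if PySem.Chars.startswith first0 ['"'] &&
       PySem.Chars.isIn ['"'] (PySem.Chars.slice first0 (some 1) none) then
      PySem.Chars.slice first0 (some 1) (some (PySem.Chars.findFrom first0 ['"'] 1 none))
    else first0
  let first2 := PySem.Chars.strip ((PySem.Chars.splitOn first1 ['@','b','y']).headD [])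
  if first2 = [] then "" else String.ofList (PySem.Chars.slice first2 none (some 500))

-- the for-loop over lines with comment_lines accumulator; returning acc models 'break'
def pvLoopA : List (List Char) → List (List Char) → List (List Char)
  | [], acc => acc
  | line :: rest, acc =>
    let s := PySem.Chars.strip line
    if PySem.Chars.startswith s ['/','/'] then
      pvLoopA rest (acc ++ [PySem.Chars.strip (PySem.Chars.slice s (some 2) none)])
    else if s ≠ [] ∧ acc = [] then acc
    else if s = [] ∧ acc ≠ [] then pvLoopA rest acc
    else acc

def description_from_tune_code_py (code : String) : String :=
  let lines := PySem.Chars.splitOn (PySem.Chars.strip code.toList) ['\n']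
  match pvLoopA lines [] with
  | [] => ""
  | first :: _ => pvPost first

-- ===== PORT B =====
def description_from_tune_code_py_alt (code : String) : String :=
  let firstLine :=
    PySem.Chars.strip ((PySem.Chars.splitOn (PySem.Chars.strip code.toList) ['\n']).headD [])
  if PySem.Chars.startswith firstLine ['/','/'] then
    pvPost (PySem.Chars.strip (PySem.Chars.slice firstLine (some 2) none))
  else ""

-- ===== PRECONDITION & SPEC =====
def Spec_description_from_tune_code_py (code : String) (out : String) : Prop := out = description_from_tune_code_py_alt code
instance (code : String) (out : String) : Decidable (Spec_description_from_tune_code_py code out) := by unfold Spec_description_from_tune_code_py; infer_instance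

-- ===== CLAIM (what is proved, stated in full; the proofs are below) =====
def Claim_equal_description_from_tune_code_py : Prop := ∀ (code : String), Dom_description_from_tune_code_py code → Spec_description_from_tune_code_py code (description_from_tune_code_py code)

-- ===== LEMMAS AND PROOFS =====

-- the loop only ever appends to a nonempty accumulator or returns it, so its head survives
theorem pvLoopA_head (lines : List (List Char)) (x : List Char) (acc : List (List Char)) :
    (pvLoopA lines (x :: acc)).head? = some x := by
  induction lines generalizing acc with
  | nil => simp [pvLoopA]
  | cons l rest ih =>
    unfold pvLoopA
    dsimp only
    split_ifs with h1 h2 h3 <;> simp_all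

theorem description_from_tune_code_py_eq (code : String) :
    description_from_tune_code_py code = description_from_tune_code_py_alt code := by
  unfold description_from_tune_code_py description_from_tune_code_py_alt
  cases hl : PySem.Chars.splitOn (PySem.Chars.strip code.toList) ['\n'] with
  | nil =>
    simp [pvLoopA]
    intro h
    exact absurd h (by decide)
  | cons l rest =>
    by_cases hs : PySem.Chars.startswith (PySem.Chars.strip l) ['/','/']
    · have h := pvLoopA_head rest
        (PySem.Chars.strip (PySem.Chars.slice (PySem.Chars.strip l) (some 2) none)) []
      simp only [pvLoopA, hs, if_true, List.nil_append, List.headD_cons]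
      cases hres : pvLoopA rest
          [PySem.Chars.strip (PySem.Chars.slice (PySem.Chars.strip l) (some 2) none)] with
      | nil => rw [hres] at h; simp at h
      | cons y ys =>
        rw [hres] at h; simp at h
        simp [h]
    · by_cases hn : PySem.Chars.strip l = []
      · rw [hn] at hs; simp [pvLoopA, hn, hs]
      · simp [pvLoopA, hs, hn]

-- ===== VERDICT (by name: the statement is the Claim_ definition above) =====
theorem description_from_tune_code_py_spec : Claim_equal_description_from_tune_code_py := by
  intro code _
  exact description_from_tune_code_py_eq code
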